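-- pv_equiv track=rewrite | github.com/m0therb0ardd/coachbot_swarm_dance_simulation | sim_pkg/user/00_move_to_circle.py | compute_ring_assignments
-- ===== SOURCE A (Python) =====
-- def compute_ring_assignments(total_robots, num_rings):
--     if num_rings < 1:
--         num_rings = 1
--     if num_rings > total_robots:
--         num_rings = total_robots
--
--     base = total_robots // num_rings
--     extra = total_robots % num_rings
--
--     counts = []
--     offsets = []
--     offset = 0
--     r = 0
--     while r < num_rings:
--         n = base
--         if r < extra:
--             n += 1
--         counts.append(n)
--         offsets.append(offset)
--         offset += n
--         r += 1
--     return counts, offsets, num_rings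
-- ===== SOURCE B (Python) =====
-- def compute_ring_assignments(total_robots, num_rings):
--     if num_rings < 1:
--         num_rings = 1
--     if num_rings > total_robots:
--         num_rings = total_robots
--
--     counts = []
--     offsets = []
--     remaining = total_robots
--     offset = 0
--     for rings_left in range(num_rings, 0, -1):
--         n = -(-remaining // rings_left)   # ceiling division: fair share for this ring
--         counts.append(n)
--         offsets.append(offset)
--         remaining -= n
--         offset += n
--     return counts, offsets, num_rings
-- ===== Notes on version B (the rewrite author's own statement) =====
-- stated objective: alternative
-- what changed: B drops the base/extra divmod and the closed-form per-ring counts entirely: it deals robots out ring by ring, giving each ring the ceiling of remaining_robots/rings_left and shrinking the remainder, so neither base, extra nor a precomputed split appears.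
import Mathlib
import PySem

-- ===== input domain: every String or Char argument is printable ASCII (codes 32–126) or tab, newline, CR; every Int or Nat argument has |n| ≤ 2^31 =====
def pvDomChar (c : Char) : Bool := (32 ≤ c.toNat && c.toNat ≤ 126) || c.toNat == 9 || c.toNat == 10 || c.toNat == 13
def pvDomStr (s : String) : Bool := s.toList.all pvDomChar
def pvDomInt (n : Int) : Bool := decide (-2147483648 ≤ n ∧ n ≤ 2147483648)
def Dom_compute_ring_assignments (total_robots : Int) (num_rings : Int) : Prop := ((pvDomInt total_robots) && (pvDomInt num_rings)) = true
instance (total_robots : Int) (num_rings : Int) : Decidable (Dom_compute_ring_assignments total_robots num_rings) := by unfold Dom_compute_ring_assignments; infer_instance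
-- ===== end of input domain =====

-- B replaces A's divmod-based split (base/extra plus a running-offset loop) by a dealing loop:
-- each ring receives the ceiling of remaining/rings_left; objective: alternative, same cost.

-- ===== PORT A =====
-- The Python while-loop over r = 0 .. num_rings-1 carrying (counts, offsets, offset)
-- is ported as a foldl over range(0, num_rings) with the same three-component state.
def compute_ring_assignments (total_robots : Int) (num_rings : Int) : List Int × List Int × Int :=
  let nr1 : Int := if num_rings < 1 then 1 else num_rings
  let nr : Int := if nr1 > total_robots then total_robots else nr1
  let base := PySem.Int.floordiv total_robots nr
  let extra := PySem.Int.mod total_robots nr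
  let s := (PySem.List.pyRange 0 nr 1).foldl
    (fun (st : List Int × List Int × Int) r =>
      let n := base + (if r < extra then 1 else 0)
      (st.1 ++ [n], st.2.1 ++ [st.2.2], st.2.2 + n))
    ([], [], 0)
  (s.1, s.2.1, nr)

-- ===== PORT B =====
-- The Python for-loop 'for rings_left in range(num_rings, 0, -1)' dealing out the remaining
-- robots is ported as the obvious structural recursion on rings_left (as a Nat).
def crFill (remaining : Int) (rings_left : Nat) (offset : Int) : List Int × List Int :=
  match rings_left with
  | 0 => ([], [])
  | Nat.succ k =>
    let rl : Int := (k : Int) + 1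
    let n : Int := -(PySem.Int.floordiv (-remaining) rl)   -- -(-remaining // rings_left)
    let rest := crFill (remaining - n) k (offset + n)
    (n :: rest.1, offset :: rest.2)

def compute_ring_assignments_alt (total_robots : Int) (num_rings : Int) : List Int × List Int × Int :=
  let nr1 : Int := if num_rings < 1 then 1 else num_rings
  let nr : Int := if nr1 > total_robots then total_robots else nr1
  let p := crFill total_robots nr.toNat 0
  (p.1, p.2, nr)

-- ===== PRECONDITION & SPEC =====
-- Pre_ excludes total_robots = 0 only: there A clamps num_rings to 0 and raises ZeroDivisionError.
def Pre_compute_ring_assignments (total_robots : Int) (num_rings : Int) : Prop := total_robots ≠ 0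
instance (total_robots : Int) (num_rings : Int) : Decidable (Pre_compute_ring_assignments total_robots num_rings) := by unfold Pre_compute_ring_assignments; infer_instance
def pvWitness_compute_ring_assignments : Int × Int := (10, 3)

def Spec_compute_ring_assignments (total_robots : Int) (num_rings : Int) (out : List Int × List Int × Int) : Prop := out = compute_ring_assignments_alt total_robots num_rings
instance (total_robots : Int) (num_rings : Int) (out : List Int × List Int × Int) : Decidable (Spec_compute_ring_assignments total_robots num_rings out) := by unfold Spec_compute_ring_assignments; infer_instance

-- ===== CLAIM (what is proved, stated in full; the proofs are below) =====
def Claim_equal_compute_ring_assignments : Prop := ∀ (total_robots : Int) (num_rings : Int), Dom_compute_ring_assignments total_robots num_rings → Pre_compute_ring_assignments total_robots num_rings → Spec_compute_ring_assignments total_robots num_rings (compute_ring_assignments total_robots num_rings)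

-- ===== LEMMAS AND PROOFS =====

-- A-side loop invariant: the fold equals closed-form maps, with final offset k*base + min k extra.
theorem pv_loop_eq (base extra : Int) (hextra : 0 ≤ extra) (k : Int) (hk : 0 ≤ k) :
    (PySem.List.pyRange 0 k 1).foldl
      (fun (st : List Int × List Int × Int) r =>
        let n := base + (if r < extra then 1 else 0)
        (st.1 ++ [n], st.2.1 ++ [st.2.2], st.2.2 + n))
      ([], [], 0)
    = ((PySem.List.pyRange 0 k 1).map (fun r => base + (if r < extra then 1 else 0)),
       (PySem.List.pyRange 0 k 1).map (fun r => r * base + min r extra),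
       k * base + min k extra) := by
  obtain ⟨n, rfl⟩ := Int.eq_ofNat_of_zero_le hk
  induction n with
  | zero => simp [PySem.List.pyRange_one_eq_nil, hextra]
  | succ m ih =>
    have hm : (0 : Int) ≤ (m : Int) := by positivity
    have hstep : ((m : Int) + 1 : Int) = ((m + 1 : Nat) : Int) := by push_cast; ring
    rw [← hstep, PySem.List.pyRange_one_succ_right (by exact_mod_cast hm)]
    rw [List.foldl_append, ih hm]
    simp only [List.foldl_cons, List.foldl_nil, List.map_append, List.map_cons, List.map_nil]
    refine Prod.ext rfl (Prod.ext rfl ?_)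
    simp only []
    rcases lt_or_ge (m : Int) extra with h | h
    · simp only [if_pos h]
      have h1 : min (m : Int) extra = (m : Int) := min_eq_left (le_of_lt h)
      have h2 : min ((m : Int) + 1) extra = (m : Int) + 1 := min_eq_left (by omega)
      rw [h1, h2]; ring
    · simp only [if_neg (not_lt.mpr h)]
      have h1 : min (m : Int) extra = extra := min_eq_right h
      have h2 : min ((m : Int) + 1) extra = extra := min_eq_right (by omega)
      rw [h1, h2]; ring

-- B-side invariant: dealing ceil(remaining/rings_left) to each ring, starting from
-- remaining = k*base + extra with 0 ≤ extra < k, yields the same closed-form maps.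
theorem pv_fill_eq (k : Nat) : ∀ (base extra off : Int), 0 ≤ extra →
    (extra < (k : Int) ∨ (k = 0 ∧ extra = 0)) →
    crFill ((k : Int) * base + extra) k off =
      ((PySem.List.pyRange 0 (k : Int) 1).map (fun r => base + (if r < extra then 1 else 0)),
       (PySem.List.pyRange 0 (k : Int) 1).map (fun r => off + (r * base + min r extra))) := by
  induction k with
  | zero =>
    intro base extra off h0 hcase
    have he : extra = 0 := by
      rcases hcase with h | h
      · simp at h; omega
      · exact h.2
    simp [crFill, he, PySem.List.pyRange_one_eq_nil]
  | succ m ih =>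
    intro base extra off h0 hcase
    have hex : extra < (m : Int) + 1 := by
      rcases hcase with h | h
      · push_cast at h; exact h
      · omega
    have hmpos : (0 : Int) < (m : Int) + 1 := by positivity
    set ind : Int := if 0 < extra then 1 else 0 with hind
    have hind0 : 0 ≤ ind := by rw [hind]; split_ifs <;> omega
    have hind1 : ind ≤ 1 := by rw [hind]; split_ifs <;> omega
    have hindpos : 0 < extra → ind = 1 := by intro h; rw [hind, if_pos h]
    have hindzero : extra = 0 → ind = 0 := by intro h; rw [hind]; simp [h]
    -- the dealt share n = base + ind
    have hn : -(PySem.Int.floordiv (-(((m.succ : Nat) : Int) * base + extra)) ((m : Int) + 1))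
        = base + ind := by
      rw [PySem.Int.neg_floordiv_neg_eq_iff_of_pos hmpos]
      constructor
      · push_cast
        rcases lt_or_ge 0 extra with h | h
        · rw [hindpos h]; nlinarith
        · have he : extra = 0 := by omega
          rw [hindzero he, he]; nlinarith
      · push_cast
        rcases lt_or_ge 0 extra with h | h
        · rw [hindpos h]; nlinarith
        · have he : extra = 0 := by omega
          rw [hindzero he, he]; nlinarith
    have hrem : ((m.succ : Nat) : Int) * base + extra - (base + ind)
        = (m : Int) * base + (extra - ind) := by push_cast; ring
    have hcase' : extra - ind < (m : Int) ∨ (m = 0 ∧ extra - ind = 0) := by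
      by_cases hm0 : m = 0
      · right
        refine ⟨hm0, ?_⟩
        have h1 : extra < 1 := by rw [hm0] at hex; simpa using hex
        have he : extra = 0 := by omega
        rw [he, hindzero he]; norm_num
      · left
        have hm1 : (1 : Int) ≤ (m : Int) := by exact_mod_cast Nat.one_le_iff_ne_zero.mpr hm0
        rcases lt_or_ge 0 extra with h | h
        · rw [hindpos h]; omega
        · have he : extra = 0 := by omega
          rw [hindzero he, he]; omega
    have h0' : 0 ≤ extra - ind := by
      rcases lt_or_ge 0 extra with h | h
      · rw [hindpos h]; omega
      · have he : extra = 0 := by omega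
        rw [hindzero he, he]; omega
    -- unfold one step of crFill
    show ((-(PySem.Int.floordiv (-(((m.succ : Nat) : Int) * base + extra)) ((m : Int) + 1))) ::
            (crFill _ m _).1, off :: (crFill _ m _).2) = _
    rw [hn, hrem]
    rw [ih base (extra - ind) (off + (base + ind)) h0' hcase']
    have hcons : PySem.List.pyRange 0 ((m.succ : Nat) : Int) 1
        = 0 :: PySem.List.pyRange 1 ((m.succ : Nat) : Int) 1 := by
      have hlt : (0 : Int) < ((m.succ : Nat) : Int) := by exact_mod_cast Nat.succ_pos m
      simpa using PySem.List.pyRange_one_cons hlt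
    rw [hcons]
    simp only [List.map_cons]
    have hlen : (((m.succ : Nat) : Int) - 1).toNat = m := by push_cast; omega
    have hlen0 : ((m : Int) - 0).toNat = m := by omega
    refine Prod.ext ?_ ?_
    · -- counts component
      simp only []
      refine List.cons_eq_cons.mpr ⟨?_, ?_⟩
      · by_cases h : 0 < extra
        · rw [hindpos h, if_pos h]
        · have he : extra = 0 := by omega
          rw [hindzero he, he]; simp
      · rw [PySem.List.pyRange_one 1 ((m.succ : Nat) : Int), PySem.List.pyRange_one 0 (m : Int)]
        rw [hlen, hlen0, List.map_map, List.map_map]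
        apply List.map_congr_left
        intro j hj
        simp only [Function.comp_apply, zero_add]
        have hite : (if (j : Int) < extra - ind then (1 : Int) else 0)
            = (if 1 + (j : Int) < extra then 1 else 0) := by
          by_cases h : 0 < extra
          · rw [hindpos h]; split_ifs <;> omega
          · have he : extra = 0 := by omega
            rw [hindzero he, he]; split_ifs <;> omega
        rw [hite]
    · -- offsets component
      simp only []
      refine List.cons_eq_cons.mpr ⟨?_, ?_⟩
      · have hm0' : min (0:Int) extra = 0 := by omega
        simp [hm0']
      · rw [PySem.List.pyRange_one 1 ((m.succ : Nat) : Int), PySem.List.pyRange_one 0 (m : Int)]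
        rw [hlen, hlen0, List.map_map, List.map_map]
        apply List.map_congr_left
        intro j hj
        simp only [Function.comp_apply, zero_add]
        have hjc : (0 : Int) ≤ (j : Int) := by positivity
        have hmin : min ((j : Int)) (extra - ind) + ind = min (1 + (j : Int)) extra := by
          by_cases h : 0 < extra
          · rw [hindpos h]; omega
          · have he : extra = 0 := by omega
            rw [hindzero he, he]; omega
        rw [← hmin]; ring

-- ===== VERDICT (by name: the statement is the Claim_ definition above) =====
theorem compute_ring_assignments_spec : Claim_equal_compute_ring_assignments := by
  intro t nrings _ hpre
  unfold Spec_compute_ring_assignments compute_ring_assignments compute_ring_assignments_alt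
  simp only []
  set nr1 : Int := if nrings < 1 then 1 else nrings with hnr1
  set nr : Int := if nr1 > t then t else nr1 with hnr
  have hnr1pos : 1 ≤ nr1 := by rw [hnr1]; split_ifs <;> omega
  rcases lt_or_ge t 0 with hneg | hge
  · -- t < 0: nr = t < 0, both sides empty
    have hnrt : nr = t := by rw [hnr]; split_ifs <;> omega
    have h1 : PySem.List.pyRange 0 nr 1 = [] := PySem.List.pyRange_one_eq_nil (by omega)
    have h2 : nr.toNat = 0 := by omega
    simp [h1, h2, crFill]
  · -- t ≥ 0, and t ≠ 0, so t ≥ 1 and nr ≥ 1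
    have ht1 : 1 ≤ t := by unfold Pre_compute_ring_assignments at hpre; omega
    have hnrpos : 1 ≤ nr := by rw [hnr]; split_ifs <;> omega
    set base := PySem.Int.floordiv t nr with hbase
    set extra := PySem.Int.mod t nr with hextra
    have hxnn : 0 ≤ extra := PySem.Int.mod_nonneg t (by omega)
    have hxlt : extra < nr := PySem.Int.mod_lt t (by omega)
    have hid : base * nr + extra = t := PySem.Int.floordiv_mul_add_mod t nr
    have hcast : ((nr.toNat : Nat) : Int) = nr := Int.toNat_of_nonneg (by omega)
    have ht_eq : ((nr.toNat : Nat) : Int) * base + extra = t := by rw [hcast]; linarith [hid]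
    rw [pv_loop_eq base extra hxnn nr (by omega)]
    have := pv_fill_eq nr.toNat base extra 0 hxnn (by left; rw [hcast]; exact hxlt)
    rw [ht_eq, hcast] at this
    rw [this]
    simp only [zero_add]
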